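-- pv_equiv track=rewrite | github.com/Capstone-Projects-2019-Fall/GAN_Image_Editor | gan_models/facial_editing_gan/process_dataset.py | check_attribute_conflict
-- ===== SOURCE A (Python) =====
-- def check_attribute_conflict(att_batch, att_name, att_names):
--     def _set(att, value, att_name):
--         if att_name in att_names:
--             att[att_names.index(att_name)] = value
--     att_id = att_names.index(att_name)
--     for att in att_batch:
--         if att_name in ['Bald', 'Receding_Hairline'] and att[att_id] == 1:
--             _set(att, 0, 'Bangs')
--         elif att_name == 'Bangs' and att[att_id] == 1:
--             _set(att, 0, 'Bald')
--             _set(att, 0, 'Receding_Hairline')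
--         elif att_name in ['Black_Hair', 'Blond_Hair', 'Brown_Hair', 'Gray_Hair'] and att[att_id] == 1:
--             for n in ['Black_Hair', 'Blond_Hair', 'Brown_Hair', 'Gray_Hair']:
--                 if n != att_name:
--                     _set(att, 0, n)
--         elif att_name in ['Straight_Hair', 'Wavy_Hair'] and att[att_id] == 1:
--             for n in ['Straight_Hair', 'Wavy_Hair']:
--                 if n != att_name:
--                     _set(att, 0, n)
--     return att_batch
-- ===== SOURCE B (Python) =====
-- CONFLICTS = {
--     'Bald': ['Bangs'],
--     'Receding_Hairline': ['Bangs'],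
--     'Bangs': ['Bald', 'Receding_Hairline'],
--     'Black_Hair': ['Blond_Hair', 'Brown_Hair', 'Gray_Hair'],
--     'Blond_Hair': ['Black_Hair', 'Brown_Hair', 'Gray_Hair'],
--     'Brown_Hair': ['Black_Hair', 'Blond_Hair', 'Gray_Hair'],
--     'Gray_Hair': ['Black_Hair', 'Blond_Hair', 'Brown_Hair'],
--     'Straight_Hair': ['Wavy_Hair'],
--     'Wavy_Hair': ['Straight_Hair'],
-- }
--
--
-- def check_attribute_conflict(att_batch, att_name, att_names):
--     # pure rebuild: no in-place mutation (A mutates rows; return value is the same)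
--     att_id = att_names.index(att_name)
--     zero = {att_names.index(n) for n in CONFLICTS.get(att_name, []) if n in att_names}
--     if not zero:
--         return att_batch
--     return [[0 if j in zero else v for j, v in enumerate(row)]
--             if row[att_id] == 1 else row
--             for row in att_batch]
-- ===== Notes on version B (the rewrite author's own statement) =====
-- stated objective: alternative
-- what changed: A dispatches through if/elif branches and mutates each row in place with targeted _set writes (re-scanning att_names per write); B resolves the conflicting column indices once into a set and purely rebuilds the batch cell-by-cell with a comprehension over enumerate(row), zeroing by membership test, mutating nothing.
import Mathlib
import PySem

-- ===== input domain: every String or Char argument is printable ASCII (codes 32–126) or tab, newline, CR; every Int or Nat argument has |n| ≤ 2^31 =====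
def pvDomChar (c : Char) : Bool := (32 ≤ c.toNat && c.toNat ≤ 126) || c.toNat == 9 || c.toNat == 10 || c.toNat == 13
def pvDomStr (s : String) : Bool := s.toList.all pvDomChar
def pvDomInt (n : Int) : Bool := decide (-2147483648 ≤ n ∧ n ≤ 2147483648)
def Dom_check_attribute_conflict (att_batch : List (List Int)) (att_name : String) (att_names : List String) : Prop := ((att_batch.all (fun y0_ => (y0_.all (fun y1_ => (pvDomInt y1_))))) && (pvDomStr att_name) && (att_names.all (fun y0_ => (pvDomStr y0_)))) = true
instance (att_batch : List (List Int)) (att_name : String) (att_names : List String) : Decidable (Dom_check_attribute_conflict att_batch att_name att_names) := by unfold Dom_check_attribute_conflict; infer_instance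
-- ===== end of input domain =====

-- B replaces A's if/elif dispatch with in-place targeted _set writes by a pure
-- cell-by-cell rebuild: the conflicting column indices are resolved once into a
-- set, and every row is rebuilt by a membership test over enumerate(row).
-- A mutates the rows of att_batch in place; B mutates nothing: the equivalence
-- proved here is about the returned value.

-- ===== PORT A =====
-- A's local helper _set(att, value, att_name)
def pvSetA (att_names : List String) (att : List Int) (value : Int) (name : String) : List Int :=
  if name ∈ att_names then PySem.List.pySetD att ((att_names.idxOf name : Nat) : Int) value else att

def check_attribute_conflict (att_batch : List (List Int)) (att_name : String) (att_names : List String) : List (List Int) :=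
  -- att_names.index(att_name): raises ValueError if absent — excluded by Pre_ (idxOf then = length, harmless here)
  let att_id : Int := ((att_names.idxOf att_name : Nat) : Int)
  att_batch.map (fun att =>
    if (att_name = "Bald" ∨ att_name = "Receding_Hairline") ∧ PySem.List.pyGet? att att_id = some 1 then
      pvSetA att_names att 0 "Bangs"
    else if att_name = "Bangs" ∧ PySem.List.pyGet? att att_id = some 1 then
      pvSetA att_names (pvSetA att_names att 0 "Bald") 0 "Receding_Hairline"
    else if att_name ∈ ["Black_Hair", "Blond_Hair", "Brown_Hair", "Gray_Hair"] ∧ PySem.List.pyGet? att att_id = some 1 then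
      (["Black_Hair", "Blond_Hair", "Brown_Hair", "Gray_Hair"]).foldl
        (fun a n => if n ≠ att_name then pvSetA att_names a 0 n else a) att
    else if (att_name = "Straight_Hair" ∨ att_name = "Wavy_Hair") ∧ PySem.List.pyGet? att att_id = some 1 then
      (["Straight_Hair", "Wavy_Hair"]).foldl
        (fun a n => if n ≠ att_name then pvSetA att_names a 0 n else a) att
    else att)

-- ===== PORT B =====
-- the module-level CONFLICTS dict literal of Source B
def pvConflicts : PySem.Dict String (List String) := PySem.Dict.mk
  [("Bald", ["Bangs"]),
   ("Receding_Hairline", ["Bangs"]),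
   ("Bangs", ["Bald", "Receding_Hairline"]),
   ("Black_Hair", ["Blond_Hair", "Brown_Hair", "Gray_Hair"]),
   ("Blond_Hair", ["Black_Hair", "Brown_Hair", "Gray_Hair"]),
   ("Brown_Hair", ["Black_Hair", "Blond_Hair", "Gray_Hair"]),
   ("Gray_Hair", ["Black_Hair", "Blond_Hair", "Brown_Hair"]),
   ("Straight_Hair", ["Wavy_Hair"]),
   ("Wavy_Hair", ["Straight_Hair"])]

def check_attribute_conflict_alt (att_batch : List (List Int)) (att_name : String) (att_names : List String) : List (List Int) :=
  let att_id : Int := ((att_names.idxOf att_name : Nat) : Int)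
  -- zero = {att_names.index(n) for n in CONFLICTS.get(att_name, []) if n in att_names}
  let zero : PySem.Set Int := PySem.Set.ofList
    (((pvConflicts.getD att_name []).filter (fun n => n ∈ att_names)).map
      (fun n => ((att_names.idxOf n : Nat) : Int)))
  if zero = [] then att_batch
  else att_batch.map (fun row =>
    if PySem.List.pyGet? row att_id = some 1 then
      (PySem.List.enumerate row).map (fun jv => if jv.1 ∈ zero then 0 else jv.2)
    else row)

-- ===== PRECONDITION & SPEC =====
-- the directed conflict partners of a name (used only by Pre_, not by either port)
def pvPartners (name : String) : List String :=
  if name = "Bald" then ["Bangs"]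
  else if name = "Receding_Hairline" then ["Bangs"]
  else if name = "Bangs" then ["Bald", "Receding_Hairline"]
  else if name = "Black_Hair" then ["Blond_Hair", "Brown_Hair", "Gray_Hair"]
  else if name = "Blond_Hair" then ["Black_Hair", "Brown_Hair", "Gray_Hair"]
  else if name = "Brown_Hair" then ["Black_Hair", "Blond_Hair", "Gray_Hair"]
  else if name = "Gray_Hair" then ["Black_Hair", "Blond_Hair", "Brown_Hair"]
  else if name = "Straight_Hair" then ["Wavy_Hair"]
  else if name = "Wavy_Hair" then ["Straight_Hair"]
  else []

-- exactly the inputs on which Python A returns: att_name present (else ValueError), and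
-- when att_name has conflict partners every row is long enough to read the flag and — if
-- the flag is 1 — long enough for each partner column present in att_names (else IndexError)
def Pre_check_attribute_conflict (att_batch : List (List Int)) (att_name : String) (att_names : List String) : Prop :=
  att_name ∈ att_names ∧
  (pvPartners att_name ≠ [] →
    ∀ row ∈ att_batch,
      att_names.idxOf att_name < row.length ∧
      (row.getD (att_names.idxOf att_name) 0 = 1 →
        ∀ n ∈ pvPartners att_name, n ∈ att_names → att_names.idxOf n < row.length))
instance (att_batch : List (List Int)) (att_name : String) (att_names : List String) : Decidable (Pre_check_attribute_conflict att_batch att_name att_names) := by unfold Pre_check_attribute_conflict; infer_instance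

def pvWitness_check_attribute_conflict : List (List Int) × String × List String :=
  ([[1, 1], [0, 1]], "Bald", ["Bald", "Bangs"])

def Spec_check_attribute_conflict (att_batch : List (List Int)) (att_name : String) (att_names : List String) (out : List (List Int)) : Prop := out = check_attribute_conflict_alt att_batch att_name att_names
instance (att_batch : List (List Int)) (att_name : String) (att_names : List String) (out : List (List Int)) : Decidable (Spec_check_attribute_conflict att_batch att_name att_names out) := by unfold Spec_check_attribute_conflict; infer_instance

-- ===== CLAIM =====
def Claim_equal_check_attribute_conflict : Prop := ∀ (att_batch : List (List Int)) (att_name : String) (att_names : List String), Dom_check_attribute_conflict att_batch att_name att_names → Pre_check_attribute_conflict att_batch att_name att_names → Spec_check_attribute_conflict att_batch att_name att_names (check_attribute_conflict att_batch att_name att_names)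

-- ===== LEMMAS AND PROOFS =====

-- a non-empty source list yields a non-empty Python set
theorem pv_ofList_ne_nil {α : Type} [BEq α] [LawfulBEq α] (x : α) (l : List α) :
    PySem.Set.ofList (x :: l) ≠ [] := by
  intro h
  have : x ∈ PySem.Set.ofList (x :: l) := by
    rw [PySem.Set.mem_ofList]; exact List.mem_cons_self ..
  rw [h] at this
  exact (List.not_mem_nil) this

-- core bridge: a chain of in-place zero-writes (A's _set) equals the pure
-- enumerate/membership rebuild (B's comprehension), for any nonnegative indices
theorem pv_chain (ts : List Int) (row : List Int) (h : ∀ j ∈ ts, 0 ≤ j) :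
    ts.foldl (fun a j => PySem.List.pySetD a j 0) row
      = (PySem.List.enumerate row).map (fun jv => if jv.1 ∈ ts then 0 else jv.2) := by
  induction ts generalizing row with
  | nil =>
      simp [PySem.List.map_snd_enumerate]
  | cons j ts ih =>
      simp only [List.foldl_cons]
      rw [ih _ (fun x hx => h x (List.mem_cons_of_mem _ hx)),
          PySem.List.pySetD_of_nonneg row 0 (h j (List.mem_cons_self ..))]
      apply List.ext_getElem
      · simp [PySem.List.length_enumerate]
      intro k h1 h2
      have hj0 : 0 ≤ j := h j (List.mem_cons_self ..)
      simp only [List.getElem_map, PySem.List.getElem_enumerate, List.length_map,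
        PySem.List.length_enumerate, List.length_set, zero_add] at h1 h2 ⊢
      by_cases hts : (k : Int) ∈ ts
      · simp [hts]
      · by_cases hkj : (k : Int) = j
        · have hj : j.toNat = k := by omega
          subst hj
          simp [hkj, List.getElem_set_self (h := by simpa using h1)]
        · have hj : j.toNat ≠ k := by omega
          simp [hts, hkj, List.getElem_set_ne hj]

-- pvSetA skips absent names: a fold of _set over names equals a fold of raw
-- zero-writes over the resolved indices of the present ones
theorem pv_foldl_set (ps : List String) (att_names : List String) (att : List Int) :
    ps.foldl (fun a n => pvSetA att_names a 0 n) att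
      = ((ps.filter (fun n => n ∈ att_names)).map
          (fun n => ((att_names.idxOf n : Nat) : Int))).foldl
          (fun a j => PySem.List.pySetD a j 0) att := by
  induction ps generalizing att with
  | nil => rfl
  | cons n ps ih =>
      rw [List.foldl_cons, ih]
      by_cases hn : n ∈ att_names <;>
        simp [pvSetA, hn]

-- the generic shape: A's guarded fold of _set over a partner list versus B's
-- set-of-indices + pure enumerate rebuild
theorem pv_main (att_batch : List (List Int)) (att_names : List String) (flagid : Int)
    (ps : List String) :
    att_batch.map (fun att =>
        if PySem.List.pyGet? att flagid = some 1
        then ps.foldl (fun a n => pvSetA att_names a 0 n) att else att)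
      = (let zero : PySem.Set Int := PySem.Set.ofList
            ((ps.filter (fun n => n ∈ att_names)).map
              (fun n => ((att_names.idxOf n : Nat) : Int)));
         if zero = [] then att_batch
         else att_batch.map (fun att =>
            if PySem.List.pyGet? att flagid = some 1
            then (PySem.List.enumerate att).map (fun jv => if jv.1 ∈ zero then 0 else jv.2)
            else att)) := by
  by_cases hL : ((ps.filter (fun n => n ∈ att_names)).map
      (fun n => ((att_names.idxOf n : Nat) : Int))) = []
  · simp only [hL]
    have : PySem.Set.ofList ([] : List Int) = [] := rfl
    simp [this, pv_foldl_set, hL]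
  · obtain ⟨x, l, hxl⟩ : ∃ x l, ((ps.filter (fun n => n ∈ att_names)).map
        (fun n => ((att_names.idxOf n : Nat) : Int))) = x :: l := by
      cases h : ((ps.filter (fun n => n ∈ att_names)).map
        (fun n => ((att_names.idxOf n : Nat) : Int))) with
      | nil => exact absurd h hL
      | cons x l => exact ⟨x, l, rfl⟩
    simp only [hxl]
    rw [if_neg (pv_ofList_ne_nil x l)]
    refine List.map_congr_left (fun att _ => ?_)
    by_cases hf : PySem.List.pyGet? att flagid = some 1
    · simp only [hf, pv_foldl_set, hxl]
      rw [pv_chain (x :: l) att (by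
        intro j hj
        rw [← hxl] at hj
        obtain ⟨n, -, rfl⟩ := List.mem_map.mp hj
        positivity)]
      refine List.map_congr_left (fun jv _ => ?_)
      by_cases hm : jv.1 ∈ x :: l <;>
        simp [hm, PySem.Set.mem_ofList]
    · simp [hf]

-- the two ports agree on every input
theorem pv_ports_eq (att_batch : List (List Int)) (att_name : String) (att_names : List String) :
    check_attribute_conflict att_batch att_name att_names
      = check_attribute_conflict_alt att_batch att_name att_names := by
  unfold check_attribute_conflict check_attribute_conflict_alt
  by_cases h1 : att_name = "Bald"
  · subst h1
    have := pv_main att_batch att_names ((att_names.idxOf "Bald" : Nat) : Int) ["Bangs"]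
    simp only [List.foldl] at this
    simpa [pvConflicts, PySem.Dict.getD_eq_get?_getD, PySem.Dict.get?] using this
  by_cases h2 : att_name = "Receding_Hairline"
  · subst h2
    have := pv_main att_batch att_names ((att_names.idxOf "Receding_Hairline" : Nat) : Int) ["Bangs"]
    simp only [List.foldl] at this
    simpa [pvConflicts, PySem.Dict.getD_eq_get?_getD, PySem.Dict.get?] using this
  by_cases h3 : att_name = "Bangs"
  · subst h3
    have := pv_main att_batch att_names ((att_names.idxOf "Bangs" : Nat) : Int) ["Bald", "Receding_Hairline"]
    simp only [List.foldl] at this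
    simpa [pvConflicts, PySem.Dict.getD_eq_get?_getD, PySem.Dict.get?] using this
  by_cases h4 : att_name = "Black_Hair"
  · subst h4
    have := pv_main att_batch att_names ((att_names.idxOf "Black_Hair" : Nat) : Int) ["Blond_Hair", "Brown_Hair", "Gray_Hair"]
    simp only [List.foldl] at this
    simpa [pvConflicts, PySem.Dict.getD_eq_get?_getD, PySem.Dict.get?] using this
  by_cases h5 : att_name = "Blond_Hair"
  · subst h5
    have := pv_main att_batch att_names ((att_names.idxOf "Blond_Hair" : Nat) : Int) ["Black_Hair", "Brown_Hair", "Gray_Hair"]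
    simp only [List.foldl] at this
    simpa [pvConflicts, PySem.Dict.getD_eq_get?_getD, PySem.Dict.get?] using this
  by_cases h6 : att_name = "Brown_Hair"
  · subst h6
    have := pv_main att_batch att_names ((att_names.idxOf "Brown_Hair" : Nat) : Int) ["Black_Hair", "Blond_Hair", "Gray_Hair"]
    simp only [List.foldl] at this
    simpa [pvConflicts, PySem.Dict.getD_eq_get?_getD, PySem.Dict.get?] using this
  by_cases h7 : att_name = "Gray_Hair"
  · subst h7
    have := pv_main att_batch att_names ((att_names.idxOf "Gray_Hair" : Nat) : Int) ["Black_Hair", "Blond_Hair", "Brown_Hair"]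
    simp only [List.foldl] at this
    simpa [pvConflicts, PySem.Dict.getD_eq_get?_getD, PySem.Dict.get?] using this
  by_cases h8 : att_name = "Straight_Hair"
  · subst h8
    have := pv_main att_batch att_names ((att_names.idxOf "Straight_Hair" : Nat) : Int) ["Wavy_Hair"]
    simp only [List.foldl] at this
    simpa [pvConflicts, PySem.Dict.getD_eq_get?_getD, PySem.Dict.get?] using this
  by_cases h9 : att_name = "Wavy_Hair"
  · subst h9
    have := pv_main att_batch att_names ((att_names.idxOf "Wavy_Hair" : Nat) : Int) ["Straight_Hair"]
    simp only [List.foldl] at this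
    simpa [pvConflicts, PySem.Dict.getD_eq_get?_getD, PySem.Dict.get?] using this
  simp [pvConflicts, PySem.Dict.getD_eq_get?_getD, PySem.Dict.get?, h1, h2, h3, h4, h5, h6, h7, h8, h9, Ne.symm h1, Ne.symm h2, Ne.symm h3, Ne.symm h4, Ne.symm h5, Ne.symm h6, Ne.symm h7, Ne.symm h8, Ne.symm h9]


-- ===== VERDICT =====
theorem check_attribute_conflict_spec : Claim_equal_check_attribute_conflict := by
  intro att_batch att_name att_names _ _
  unfold Spec_check_attribute_conflict
  exact pv_ports_eq att_batch att_name att_names
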